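-- pv_equiv track=rewrite | github.com/pypi-data/pypi-mirror-400 | packages/codacle-graph-sdk/codacle_graph_sdk-1.1.1-py3-none-any.whl/codacle_graph_sdk/models/nodes/__init__.py | _infer_node_type_from_path
-- ===== SOURCE A (Python) =====
-- def _infer_node_type_from_path(path: str) -> str | None:
--     """Infer node type from path string.
--
--     Finds the LAST (most specific) type indicator in the path.
--     E.g., 'client:Axoft/module:foo/class:Bar' -> 'Class'
--     """
--     path_lower = path.lower()
--
--     # Type prefixes in order of specificity (most specific first for matching)
--     type_prefixes = [
--         ("attribute:", "Attribute"),
--         ("object:", "Object"),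
--         ("subroutine:", "Subroutine"),
--         ("method:", "Subroutine"),
--         ("class:", "Class"),
--         ("module:", "Module"),
--         ("application:", "Application"),
--         ("client:", "Client"),
--     ]
--
--     # Find the rightmost (most specific) type indicator
--     last_match = None
--     last_pos = -1
--
--     for prefix, node_type in type_prefixes:
--         # Find the last occurrence of this prefix
--         pos = path_lower.rfind(prefix)
--         if pos > last_pos:
--             last_pos = pos
--             last_match = node_type
--
--     return last_match
-- ===== SOURCE B (Python) =====
-- _TYPE_PREFIXES = [
--     ("attribute:", "Attribute"),
--     ("object:", "Object"),
--     ("subroutine:", "Subroutine"),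
--     ("method:", "Subroutine"),
--     ("class:", "Class"),
--     ("module:", "Module"),
--     ("application:", "Application"),
--     ("client:", "Client"),
-- ]
--
--
-- def _infer_node_type_from_path(path):
--     """Infer node type from path: type of the rightmost 'prefix:' indicator."""
--     path_lower = path.lower()
--     for i in range(len(path_lower) - 1, -1, -1):
--         for prefix, node_type in _TYPE_PREFIXES:
--             if path_lower.startswith(prefix, i):
--                 return node_type
--     return None
-- ===== Notes on version B (the rewrite author's own statement) =====
-- stated objective: simpler
-- what changed: Replaces eight separate rfind scans plus a running max-position comparison with a single right-to-left scan that returns the type of the first (i.e. rightmost) matching prefix, exiting early.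
import Mathlib
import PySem

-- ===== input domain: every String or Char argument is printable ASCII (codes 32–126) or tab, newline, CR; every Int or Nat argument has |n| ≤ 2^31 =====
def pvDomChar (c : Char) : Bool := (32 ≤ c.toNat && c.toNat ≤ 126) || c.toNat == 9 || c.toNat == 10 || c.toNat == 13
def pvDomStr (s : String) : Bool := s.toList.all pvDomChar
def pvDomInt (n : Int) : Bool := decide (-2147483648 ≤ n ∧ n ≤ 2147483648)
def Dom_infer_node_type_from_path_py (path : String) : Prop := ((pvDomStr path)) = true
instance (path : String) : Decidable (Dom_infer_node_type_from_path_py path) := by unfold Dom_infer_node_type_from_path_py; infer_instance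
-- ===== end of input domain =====

-- B replaces A's eight rfind scans plus running max-position comparison by one right-to-left
-- scan returning the rightmost match's type (objective: simpler).

-- ===== PORT A =====
-- literal transliteration: lower the path, rfind each of the eight prefixes,
-- keep the node type of the strictly-largest position seen (running max fold).
def infer_node_type_from_path_py (path : String) : Option String :=
  let path_lower := PySem.Chars.lower path.toList
  let type_prefixes : List (List Char × String) :=
    [("attribute:".toList, "Attribute"), ("object:".toList, "Object"),
     ("subroutine:".toList, "Subroutine"), ("method:".toList, "Subroutine"),
     ("class:".toList, "Class"), ("module:".toList, "Module"),
     ("application:".toList, "Application"), ("client:".toList, "Client")]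
  let r := type_prefixes.foldl
    (fun (st : Option String × Int) pt =>
      let pos := PySem.Chars.rfind path_lower pt.1
      if pos > st.2 then (some pt.2, pos) else st)
    (none, -1)
  r.1

-- ===== PORT B =====
-- B's module-level prefix table
def pvTypePrefixes : List (List Char × String) :=
  [("attribute:".toList, "Attribute"), ("object:".toList, "Object"),
   ("subroutine:".toList, "Subroutine"), ("method:".toList, "Subroutine"),
   ("class:".toList, "Class"), ("module:".toList, "Module"),
   ("application:".toList, "Application"), ("client:".toList, "Client")]

-- B's inner for-loop with `return`: first prefix matching at position i
def pvMatchAt (cs : List Char) (i : Nat) : Option String :=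
  pvTypePrefixes.findSome? (fun pt =>
    if PySem.Chars.startswith (cs.drop i) pt.1 then some pt.2 else none)

-- B's outer for-loop over range(len-1, -1, -1) with early return
def pvScan (cs : List Char) : Nat → Option String
  | 0 => none
  | i + 1 =>
    match pvMatchAt cs i with
    | some t => some t
    | none => pvScan cs i

def infer_node_type_from_path_py_alt (path : String) : Option String :=
  let path_lower := PySem.Chars.lower path.toList
  pvScan path_lower path_lower.length

-- ===== PRECONDITION & SPEC =====
def Spec_infer_node_type_from_path_py (path : String) (out : Option String) : Prop := out = infer_node_type_from_path_py_alt path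
instance (path : String) (out : Option String) : Decidable (Spec_infer_node_type_from_path_py path out) := by unfold Spec_infer_node_type_from_path_py; infer_instance

-- ===== CLAIM (what is proved, stated in full; the proofs are below) =====
def Claim_equal_infer_node_type_from_path_py : Prop := ∀ (path : String), Dom_infer_node_type_from_path_py path → Spec_infer_node_type_from_path_py path (infer_node_type_from_path_py path)

-- ===== LEMMAS AND PROOFS =====

-- if the running max already dominates every candidate position, the fold is the identity
theorem pvFoldStay (p : List Char × String → Int) :
    ∀ (L : List (List Char × String)) (s : Option String × Int),
      (∀ pt ∈ L, p pt ≤ s.2) →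
      L.foldl (fun st pt => if p pt > st.2 then (some pt.2, p pt) else st) s = s := by
  intro L
  induction L with
  | nil => intro s _; rfl
  | cons a L ih =>
    intro s h
    have ha : ¬ (p a > s.2) := not_lt.mpr (h a (by simp))
    simp only [List.foldl_cons, if_neg ha]
    exact ih s (fun pt hpt => h pt (List.mem_cons_of_mem _ hpt))

-- one right-to-left step of the running-max fold: if some element matches at the new
-- (strictly larger) position, the first such element wins; otherwise nothing changes.
theorem pvFoldCases (k : Int) (p q : List Char × String → Int) (m : List Char × String → Bool)
    (hpq : ∀ pt, p pt = if m pt then k + 1 else q pt) (hq : ∀ pt, q pt ≤ k) :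
    ∀ (L : List (List Char × String)) (s : Option String × Int), s.2 ≤ k →
      (L.foldl (fun st pt => if p pt > st.2 then (some pt.2, p pt) else st) s).1 =
      (match L.findSome? (fun pt => if m pt then some pt.2 else none) with
       | some t => some t
       | none => (L.foldl (fun st pt => if q pt > st.2 then (some pt.2, q pt) else st) s).1) := by
  intro L
  induction L with
  | nil => intro s _; simp
  | cons a L ih =>
    intro s hs
    have hple : ∀ pt, p pt ≤ k + 1 := by
      intro pt; rw [hpq pt]; split
      · exact le_refl _
      · exact le_trans (hq pt) (by omega)
    by_cases hm : m a = true
    · have hpa : p a = k + 1 := by rw [hpq a, if_pos hm]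
      have hgt : p a > s.2 := by omega
      simp only [List.foldl_cons, List.findSome?_cons, hm, if_pos hgt, if_true]
      have : (L.foldl (fun st pt => if p pt > st.2 then (some pt.2, p pt) else st)
          (some a.2, p a)) = (some a.2, p a) := by
        apply pvFoldStay
        intro pt _; rw [hpa]; exact hple pt
      rw [this]
    · have hpa : p a = q a := by rw [hpq a, if_neg hm]
      simp only [List.foldl_cons, List.findSome?_cons, if_neg hm, hpa]
      by_cases hgt : q a > s.2
      · rw [if_pos hgt]
        exact ih (some a.2, q a) (hq a)
      · rw [if_neg hgt]
        exact ih s hs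

-- rfind's scanner never exceeds its fuel
theorem pv_go_le (cs pre : List Char) : ∀ k : Nat, PySem.Chars.rfind.go cs pre k ≤ (k : Int) := by
  intro k
  induction k with
  | zero =>
    simp only [PySem.Chars.rfind.go]
    split <;> omega
  | succ j ih =>
    show PySem.Chars.rfind.go cs pre (j + 1) ≤ ((j + 1 : Nat) : Int)
    simp only [PySem.Chars.rfind.go]
    split
    · push_cast; omega
    · exact le_trans ih (by push_cast; omega)

-- the findSome? body produced by pvFoldCases is exactly pvMatchAt
theorem pvMatchAt_def (cs : List Char) (i : Nat) :
    List.findSome? (fun pt : List Char × String =>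
      if PySem.Chars.startswith (List.drop i cs) pt.1 then some pt.2 else none) pvTypePrefixes =
    pvMatchAt cs i := rfl

-- main invariant: the eight-rfind running-max fold with fuel k equals
-- B's right-to-left scan over positions k, k-1, …, 0.
theorem pv_main (cs : List Char) : ∀ k : Nat,
    (pvTypePrefixes.foldl
      (fun (st : Option String × Int) pt =>
        if PySem.Chars.rfind.go cs pt.1 k > st.2 then (some pt.2, PySem.Chars.rfind.go cs pt.1 k) else st)
      (none, -1)).1 = pvScan cs (k + 1) := by
  intro k
  induction k with
  | zero =>
    have h := pvFoldCases (-1)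
      (fun pt => PySem.Chars.rfind.go cs pt.1 0)
      (fun _ => (-1 : Int))
      (fun pt => PySem.Chars.startswith (List.drop 0 cs) pt.1)
      (by intro pt; simp only [PySem.Chars.rfind.go, PySem.Chars.startswith, List.drop_zero]; norm_num)
      (by intro pt; exact le_refl _)
      pvTypePrefixes (none, -1) (by norm_num)
    beta_reduce at h
    rw [pvMatchAt_def cs 0] at h
    rw [h]
    rw [pvFoldStay (fun _ => (-1 : Int)) pvTypePrefixes (none, -1) (by intro pt _; exact le_refl _)]
    rw [show pvScan cs 1 = (match pvMatchAt cs 0 with | some t => some t | none => pvScan cs 0) from rfl]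
    cases pvMatchAt cs 0 <;> rfl
  | succ j ih =>
    have h := pvFoldCases (j : Int)
      (fun pt => PySem.Chars.rfind.go cs pt.1 (j + 1))
      (fun pt => PySem.Chars.rfind.go cs pt.1 j)
      (fun pt => PySem.Chars.startswith (List.drop (j + 1) cs) pt.1)
      (by intro pt; simp only [PySem.Chars.rfind.go, PySem.Chars.startswith]
          split <;> push_cast <;> omega)
      (fun pt => pv_go_le cs pt.1 j)
      pvTypePrefixes (none, -1) (by push_cast; omega)
    beta_reduce at h
    rw [pvMatchAt_def cs (j + 1)] at h
    rw [h, ih]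
    cases hmx : pvMatchAt cs (j + 1) <;> (conv_rhs => rw [pvScan]) <;> rw [hmx]

-- no prefix matches at the end-of-string position
theorem pvMatchAt_length (cs : List Char) : pvMatchAt cs cs.length = none := by
  unfold pvMatchAt
  rw [List.drop_length]
  decide

-- ===== VERDICT (by name: the statement is the Claim_ definition above) =====
theorem infer_node_type_from_path_py_spec : Claim_equal_infer_node_type_from_path_py := by
  intro path _
  unfold Spec_infer_node_type_from_path_py infer_node_type_from_path_py infer_node_type_from_path_py_alt
  simp only [PySem.Chars.rfind]
  have h := pv_main (PySem.Chars.lower path.toList) (PySem.Chars.lower path.toList).length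
  rw [show ([("attribute:".toList, "Attribute"), ("object:".toList, "Object"),
     ("subroutine:".toList, "Subroutine"), ("method:".toList, "Subroutine"),
     ("class:".toList, "Class"), ("module:".toList, "Module"),
     ("application:".toList, "Application"), ("client:".toList, "Client")] : List (List Char × String)) = pvTypePrefixes from rfl]
  rw [h]
  simp only [pvScan, pvMatchAt_length]
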